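-- pv_equiv track=rewrite | github.com/Gek0r/qalm-config | cleanmatch.py | getFinalScores
-- ===== SOURCE A (Python) =====
-- def getFinalScores(awayArr, homeArr):
--     home = 0
--     away = 0
--     tie = 0
--     counter = 0
--     for score in awayArr:
--         if score > homeArr[counter]:
--             away = away + 1
--         if score < homeArr[counter]:
--             home = home + 1
--         if score == homeArr[counter]:
--             tie = tie + 1
--         counter = counter + 1
--     return home, away, tie
-- ===== SOURCE B (Python) =====
-- def _count(awayArr, homeArr, pred):
--     return sum(1 for i in range(len(awayArr)) if pred(awayArr[i], homeArr[i]))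
--
-- def getFinalScores(awayArr, homeArr):
--     home = _count(awayArr, homeArr, lambda a, h: a < h)
--     away = _count(awayArr, homeArr, lambda a, h: a > h)
--     tie = _count(awayArr, homeArr, lambda a, h: a == h)
--     return home, away, tie
-- ===== Notes on version B (the rewrite author's own statement) =====
-- stated objective: alternative
-- what changed: Replaces the single stateful indexed loop (home/away/tie/counter accumulators) by three independent counting passes via a shared _count helper over range(len(awayArr)).
import Mathlib
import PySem

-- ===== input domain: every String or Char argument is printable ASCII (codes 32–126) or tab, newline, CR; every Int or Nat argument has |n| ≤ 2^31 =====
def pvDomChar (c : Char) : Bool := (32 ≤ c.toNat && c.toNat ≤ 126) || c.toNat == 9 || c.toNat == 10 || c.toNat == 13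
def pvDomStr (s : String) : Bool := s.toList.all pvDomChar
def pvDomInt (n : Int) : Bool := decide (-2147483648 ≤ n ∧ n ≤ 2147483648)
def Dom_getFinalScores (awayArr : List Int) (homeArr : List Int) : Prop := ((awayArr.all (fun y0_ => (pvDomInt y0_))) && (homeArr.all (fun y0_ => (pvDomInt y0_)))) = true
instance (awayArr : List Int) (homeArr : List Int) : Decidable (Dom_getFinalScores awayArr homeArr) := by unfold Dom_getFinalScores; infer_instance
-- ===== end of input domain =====

-- B is a different decomposition of the same O(n) task: three independent counting passes instead of one stateful indexed loop.
-- Equivalence is about return values; neither version mutates its arguments.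

-- ===== PORT A =====
-- the for-loop of A as structural recursion over awayArr, carrying (home, away, tie, counter)
def pvGoA (hm : List Int) : List Int → Int → Int → Int → Int → Int × Int × Int
  | [], home, away, tie, _counter => (home, away, tie)
  | score :: rest, home, away, tie, counter =>
    let hv := (PySem.List.pyGet? hm counter).getD 0   -- homeArr[counter]; none = IndexError, excluded by Pre_
    pvGoA hm rest (if score < hv then home + 1 else home)
                  (if score > hv then away + 1 else away)
                  (if score = hv then tie + 1 else tie)
                  (counter + 1)

def getFinalScores (awayArr : List Int) (homeArr : List Int) : Int × Int × Int :=
  pvGoA homeArr awayArr 0 0 0 0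

-- ===== PORT B =====
-- _count(awayArr, homeArr, pred) = sum(1 for i in range(len(awayArr)) if pred(awayArr[i], homeArr[i]))
def pvCountB (awayArr homeArr : List Int) (pred : Int → Int → Bool) : Int :=
  ((PySem.List.pyRange 0 awayArr.length 1).map
    (fun i => if pred ((PySem.List.pyGet? awayArr i).getD 0) ((PySem.List.pyGet? homeArr i).getD 0)
              then (1 : Int) else 0)).sum

def getFinalScores_alt (awayArr : List Int) (homeArr : List Int) : Int × Int × Int :=
  (pvCountB awayArr homeArr (fun a h => a < h),
   pvCountB awayArr homeArr (fun a h => a > h),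
   pvCountB awayArr homeArr (fun a h => a == h))

-- ===== PRECONDITION & SPEC =====
-- Python A raises IndexError at homeArr[counter] when homeArr is shorter than awayArr; excluded here.
def Pre_getFinalScores (awayArr : List Int) (homeArr : List Int) : Prop :=
  awayArr.length ≤ homeArr.length
instance (awayArr : List Int) (homeArr : List Int) : Decidable (Pre_getFinalScores awayArr homeArr) := by
  unfold Pre_getFinalScores; infer_instance

def pvWitness_getFinalScores : List Int × List Int := ([3, 1, 2], [2, 1, 5])

def Spec_getFinalScores (awayArr : List Int) (homeArr : List Int) (out : Int × Int × Int) : Prop := out = getFinalScores_alt awayArr homeArr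
instance (awayArr : List Int) (homeArr : List Int) (out : Int × Int × Int) : Decidable (Spec_getFinalScores awayArr homeArr out) := by unfold Spec_getFinalScores; infer_instance

-- ===== CLAIM (what is proved, stated in full; the proofs are below) =====
def Claim_equal_getFinalScores : Prop := ∀ (awayArr : List Int) (homeArr : List Int), Dom_getFinalScores awayArr homeArr → Pre_getFinalScores awayArr homeArr → Spec_getFinalScores awayArr homeArr (getFinalScores awayArr homeArr)

-- ===== LEMMAS AND PROOFS =====

-- index-shifted count, the common value of both loops
def pvCnt (aw hm : List Int) (c : Nat) (p : Int → Int → Bool) : Int :=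
  ((List.range aw.length).map (fun k => if p (aw.getD k 0) (hm.getD (c + k) 0) then (1 : Int) else 0)).sum

lemma pvCnt_cons (s : Int) (rest hm : List Int) (c : Nat) (p : Int → Int → Bool) :
    pvCnt (s :: rest) hm c p =
      (if p s (hm.getD c 0) then (1 : Int) else 0) + pvCnt rest hm (c + 1) p := by
  simp only [pvCnt, List.range_succ_eq_map, List.map_map, Function.comp_def, List.map_cons,
    List.sum_cons, List.length_cons]
  congr 1
  apply congrArg List.sum
  apply List.map_congr_left
  intro k _
  have : c + (k + 1) = c + 1 + k := by omega
  simp [this, Nat.succ_eq_add_one]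

lemma pvGoA_eq (hm : List Int) (aw : List Int) : ∀ (c : Nat) (h a t : Int),
    pvGoA hm aw h a t (c : Int) =
      (h + pvCnt aw hm c (fun x y => x < y),
       a + pvCnt aw hm c (fun x y => x > y),
       t + pvCnt aw hm c (fun x y => x == y)) := by
  induction aw with
  | nil => intro c h a t; simp [pvGoA, pvCnt]
  | cons s rest ih =>
    intro c h a t
    have hcast : ((c : Int) + 1) = ((c + 1 : Nat) : Int) := by push_cast; ring
    have hv : ((PySem.List.pyGet? hm (c : Int)).getD 0) = hm.getD c 0 := by
      simp [PySem.List.pyGet?_natCast, List.getD_eq_getElem?_getD]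
    simp only [pvGoA, hv, hcast, ih (c + 1)]
    rw [pvCnt_cons, pvCnt_cons, pvCnt_cons]
    simp only [gt_iff_lt, beq_iff_eq, decide_eq_true_eq]
    split_ifs <;> refine Prod.ext ?_ (Prod.ext ?_ ?_) <;> simp <;> ring

lemma pvCountB_eq (aw hm : List Int) (p : Int → Int → Bool) :
    pvCountB aw hm p = pvCnt aw hm 0 p := by
  unfold pvCountB pvCnt
  rw [PySem.List.pyRange_one]
  simp [List.map_map, Function.comp_def, List.getD_eq_getElem?_getD]

-- ===== VERDICT (by name: the statement is the Claim_ definition above) =====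
theorem getFinalScores_spec : Claim_equal_getFinalScores := by
  intro awayArr homeArr _ _
  unfold Spec_getFinalScores getFinalScores getFinalScores_alt
  have := pvGoA_eq homeArr awayArr 0 0 0 0
  simp only [Nat.cast_zero] at this
  rw [this, pvCountB_eq, pvCountB_eq, pvCountB_eq]
  refine Prod.ext ?_ (Prod.ext ?_ ?_) <;> simp
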